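-- pv_equiv track=rewrite | github.com/cdavidd/Computacion-Cuantica | complex.py | productoTensor
-- ===== SOURCE A (Python) =====
-- def producto(x,y):
--     #2
--     a1=x[0]*y[0]-(x[1]*y[1])
--     b1=x[0]*y[1]+x[1]*y[0]
--     c=(a1,b1)
--     return c
--
-- def productoTensor(m1,m2):
--     #15
--     res= [[0 for x in range(len(m1[0])*len(m2[0]))] for y in range (len(m1)*len(m2))]
--     for i in range(len(m1)):
--         for j in range (len(m1[0])):
--             for x in range(len(m2)):
--                 for y in range(len(m2[0])):
--                     res[i*len(m2)+x][j*len(m2[0])+y]= producto(m1[i][j],m2[x][y])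
--     return res
-- ===== SOURCE B (Python) =====
-- def producto(x,y):
--     a1=x[0]*y[0]-(x[1]*y[1])
--     b1=x[0]*y[1]+x[1]*y[0]
--     c=(a1,b1)
--     return c
--
-- def productoTensor(m1,m2):
--     # gather form: each output cell reads its source entries via divmod
--     n2, c2 = len(m2), len(m2[0])
--     return [[producto(m1[r // n2][c // c2], m2[r % n2][c % c2])
--              for c in range(len(m1[0]) * c2)]
--             for r in range(len(m1) * n2)]
-- ===== Notes on version B (the rewrite author's own statement) =====
-- stated objective: simpler
-- what changed: B builds each output cell directly by a gather with divmod index recovery (r//len(m2), r%len(m2), c//len(m2[0]), c%len(m2[0])) in a comprehension, instead of A's pre-allocated zero matrix filled by a four-deep scatter loop over source indices.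
-- outside the precondition, e.g. on productoTensor([[(1, 0)]], []): A returns [], B raises IndexError
import Mathlib
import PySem

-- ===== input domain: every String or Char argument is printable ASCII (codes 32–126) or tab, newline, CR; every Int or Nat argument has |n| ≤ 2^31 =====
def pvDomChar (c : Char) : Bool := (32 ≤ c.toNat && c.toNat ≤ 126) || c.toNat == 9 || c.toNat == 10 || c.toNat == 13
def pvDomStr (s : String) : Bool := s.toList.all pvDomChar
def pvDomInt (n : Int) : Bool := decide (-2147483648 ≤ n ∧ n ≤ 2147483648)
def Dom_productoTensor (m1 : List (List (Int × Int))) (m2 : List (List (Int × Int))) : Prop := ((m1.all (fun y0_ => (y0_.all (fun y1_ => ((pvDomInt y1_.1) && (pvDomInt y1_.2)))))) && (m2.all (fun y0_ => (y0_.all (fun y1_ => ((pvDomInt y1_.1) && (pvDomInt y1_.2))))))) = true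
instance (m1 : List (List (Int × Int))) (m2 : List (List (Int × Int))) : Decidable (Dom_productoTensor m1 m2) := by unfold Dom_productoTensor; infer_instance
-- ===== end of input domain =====

-- B replaces A's zero-initialised matrix filled by a four-deep scatter loop with a direct
-- gather: each output cell is computed from its source entries recovered by div/mod (simpler).

-- ===== PORT A =====
def producto (x y : Int × Int) : Int × Int :=
  let a1 := x.1 * y.1 - x.2 * y.2
  let b1 := x.1 * y.2 + x.2 * y.1
  (a1, b1)

-- res[a][b] = v with in-range indices (guaranteed by the loop bounds)
def set2d (M : List (List (Int × Int))) (r c : Nat) (v : Int × Int) : List (List (Int × Int)) :=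
  M.set r ((M.getD r []).set c v)

def productoTensor (m1 : List (List (Int × Int))) (m2 : List (List (Int × Int))) : List (List (Int × Int)) :=
  let n1 := m1.length
  let c1 := (m1.getD 0 []).length
  let n2 := m2.length
  let c2 := (m2.getD 0 []).length
  let res := (List.range (n1 * n2)).map (fun _ => (List.range (c1 * c2)).map (fun _ => ((0 : Int), (0 : Int))))
  (List.range n1).foldl (fun res i =>
    (List.range c1).foldl (fun res j =>
      (List.range n2).foldl (fun res x =>
        (List.range c2).foldl (fun res y =>
          set2d res (i * n2 + x) (j * c2 + y)
            (producto ((m1.getD i []).getD j (0, 0)) ((m2.getD x []).getD y (0, 0)))) res) res) res) res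

-- ===== PORT B =====
def productoTensor_alt (m1 : List (List (Int × Int))) (m2 : List (List (Int × Int))) : List (List (Int × Int)) :=
  let n2 := m2.length
  let c2 := (m2.getD 0 []).length
  (List.range (m1.length * n2)).map (fun r =>
    (List.range ((m1.getD 0 []).length * c2)).map (fun c =>
      producto ((m1.getD (r / n2) []).getD (c / c2) (0, 0)) ((m2.getD (r % n2) []).getD (c % c2) (0, 0))))

-- ===== PRECONDITION & SPEC =====
-- Pre_ excludes the inputs where one of the programs raises IndexError: m2 = [], where A
-- happens to return [] (len(m1)*len(m2) == 0 so len(m2[0]) is never evaluated) but B's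
-- natural len(m2[0]) raises; and inputs where a row is shorter than the first row and the
-- shortfall is actually indexed, where BOTH A and B raise.
def Pre_productoTensor (m1 : List (List (Int × Int))) (m2 : List (List (Int × Int))) : Prop :=
  m2 ≠ [] ∧ ((m1.getD 0 []).length = 0 ∨ (m2.getD 0 []).length = 0 ∨
    ((∀ row ∈ m1, (m1.getD 0 []).length ≤ row.length) ∧
     (∀ row ∈ m2, (m2.getD 0 []).length ≤ row.length)))
instance (m1 : List (List (Int × Int))) (m2 : List (List (Int × Int))) : Decidable (Pre_productoTensor m1 m2) := by unfold Pre_productoTensor; infer_instance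

def pvWitness_productoTensor : (List (List (Int × Int))) × (List (List (Int × Int))) :=
  ([[(1, 2)]], [[(0, 1)]])

def Spec_productoTensor (m1 : List (List (Int × Int))) (m2 : List (List (Int × Int))) (out : List (List (Int × Int))) : Prop := out = productoTensor_alt m1 m2
instance (m1 : List (List (Int × Int))) (m2 : List (List (Int × Int))) (out : List (List (Int × Int))) : Decidable (Spec_productoTensor m1 m2 out) := by unfold Spec_productoTensor; infer_instance

-- ===== CLAIM (what is proved, stated in full; the proofs are below) =====
def Claim_equal_productoTensor : Prop := ∀ (m1 : List (List (Int × Int))) (m2 : List (List (Int × Int))), Dom_productoTensor m1 m2 → Pre_productoTensor m1 m2 → Spec_productoTensor m1 m2 (productoTensor m1 m2)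

-- ===== LEMMAS AND PROOFS =====

def pvGet2d (M : List (List (Int × Int))) (r c : Nat) : Int × Int :=
  (M.getD r []).getD c (0, 0)

def pvWriteAll (L : List (Nat × Nat × (Int × Int))) (M : List (List (Int × Int))) : List (List (Int × Int)) :=
  L.foldl (fun M e => set2d M e.1 e.2.1 e.2.2) M

theorem set2d_length (M : List (List (Int × Int))) (r c : Nat) (v : Int × Int) :
    (set2d M r c v).length = M.length := by simp [set2d]

theorem getD_set (l : List (List (Int × Int))) (i j : Nat) (a : List (Int × Int)) :
    (l.set i a).getD j [] = if i = j ∧ i < l.length then a else l.getD j [] := by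
  simp only [List.getD, List.getElem?_set]
  split_ifs with h1 h2 h3 <;> simp_all <;> omega

theorem set2d_row_length (M : List (List (Int × Int))) (r c : Nat) (v : Int × Int) (k : Nat) :
    ((set2d M r c v).getD k []).length = (M.getD k []).length := by
  simp only [set2d, getD_set]
  split
  · rename_i h; rw [← h.1]; simp
  · rfl

theorem writeAll_cons (e : Nat × Nat × (Int × Int)) (t : List (Nat × Nat × (Int × Int)))
    (M : List (List (Int × Int))) :
    pvWriteAll (e :: t) M = pvWriteAll t (set2d M e.1 e.2.1 e.2.2) := rfl

theorem writeAll_length (L : List (Nat × Nat × (Int × Int))) (M : List (List (Int × Int))) :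
    (pvWriteAll L M).length = M.length := by
  induction L generalizing M with
  | nil => rfl
  | cons e t ih => rw [writeAll_cons, ih, set2d_length]

theorem writeAll_row_length (L : List (Nat × Nat × (Int × Int))) (M : List (List (Int × Int))) (k : Nat) :
    ((pvWriteAll L M).getD k []).length = (M.getD k []).length := by
  induction L generalizing M with
  | nil => rfl
  | cons e t ih => rw [writeAll_cons, ih, set2d_row_length]

theorem get2d_set2d_self (M : List (List (Int × Int))) (r c : Nat) (v : Int × Int)
    (hr : r < M.length) (hc : c < (M.getD r []).length) :
    pvGet2d (set2d M r c v) r c = v := by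
  simp only [pvGet2d, set2d, getD_set]
  rw [if_pos (by exact ⟨trivial, hr⟩)]
  rw [List.getD_eq_getElem _ _ (by simpa using hc), List.getElem_set_self]

theorem get2d_set2d_ne (M : List (List (Int × Int))) (r c : Nat) (v : Int × Int) (r' c' : Nat)
    (h : ¬(r = r' ∧ c = c')) :
    pvGet2d (set2d M r c v) r' c' = pvGet2d M r' c' := by
  simp only [pvGet2d, set2d, getD_set]
  split
  · rename_i h'
    have hrr : r = r' := h'.1
    have hcc : c ≠ c' := fun hcc => h ⟨hrr, hcc⟩
    rw [← hrr]
    simp only [List.getD]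
    rw [List.getElem?_set_ne hcc]
  · rfl

theorem writeAll_not_written (L : List (Nat × Nat × (Int × Int))) (M : List (List (Int × Int)))
    (r c : Nat) (h : ∀ e ∈ L, ¬(e.1 = r ∧ e.2.1 = c)) :
    pvGet2d (pvWriteAll L M) r c = pvGet2d M r c := by
  induction L generalizing M with
  | nil => rfl
  | cons e t ih =>
    rw [writeAll_cons, ih _ (fun e' he' => h e' (List.mem_cons_of_mem _ he')),
        get2d_set2d_ne _ _ _ _ _ _ (h e List.mem_cons_self)]

theorem writeAll_unique (L : List (Nat × Nat × (Int × Int))) (M : List (List (Int × Int)))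
    (r c : Nat) (v : Int × Int)
    (hall : ∀ e ∈ L, e.1 = r → e.2.1 = c → e.2.2 = v)
    (hmem : ∃ e ∈ L, e.1 = r ∧ e.2.1 = c)
    (hr : r < M.length) (hc : c < (M.getD r []).length) :
    pvGet2d (pvWriteAll L M) r c = v := by
  induction L generalizing M with
  | nil => simp at hmem
  | cons e t ih =>
    rw [writeAll_cons]
    by_cases htm : ∃ e' ∈ t, e'.1 = r ∧ e'.2.1 = c
    · exact ih _ (fun e' he' => hall e' (List.mem_cons_of_mem _ he')) htm
        (by rw [set2d_length]; exact hr) (by rw [set2d_row_length]; exact hc)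
    · obtain ⟨e', he', h1, h2⟩ := hmem
      rcases List.mem_cons.mp he' with rfl | hmt
      · rw [writeAll_not_written _ _ _ _ (fun e'' he'' hw => htm ⟨e'', he'', hw⟩),
            h1, h2, get2d_set2d_self _ _ _ _ hr hc]
        exact hall e' List.mem_cons_self h1 h2
      · exact absurd ⟨e', hmt, h1, h2⟩ htm

-- the quadruple scatter loop of port A as a flat write list
def pvL (m1 m2 : List (List (Int × Int))) : List (Nat × Nat × (Int × Int)) :=
  let n1 := m1.length
  let c1 := (m1.getD 0 []).length
  let n2 := m2.length
  let c2 := (m2.getD 0 []).length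
  (List.range n1).flatMap (fun i =>
    (List.range c1).flatMap (fun j =>
      (List.range n2).flatMap (fun x =>
        (List.range c2).map (fun y =>
          (i * n2 + x, j * c2 + y,
            producto ((m1.getD i []).getD j (0, 0)) ((m2.getD x []).getD y (0, 0)))))))

def pvRes0 (m1 m2 : List (List (Int × Int))) : List (List (Int × Int)) :=
  (List.range (m1.length * m2.length)).map
    (fun _ => (List.range ((m1.getD 0 []).length * (m2.getD 0 []).length)).map (fun _ => ((0 : Int), (0 : Int))))

theorem productoTensor_eq_writeAll (m1 m2 : List (List (Int × Int))) :
    productoTensor m1 m2 = pvWriteAll (pvL m1 m2) (pvRes0 m1 m2) := by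
  simp only [productoTensor, pvWriteAll, pvL, pvRes0, List.foldl_flatMap, List.foldl_map]

theorem div_mod_unique (i x n r : Nat) (hx : x < n) (h : i * n + x = r) :
    i = r / n ∧ x = r % n := by
  subst h
  have hn : 0 < n := by omega
  constructor
  · rw [Nat.mul_comm i n, Nat.mul_add_div hn, Nat.div_eq_of_lt hx]
    omega
  · rw [Nat.mul_comm i n, Nat.mul_add_mod, Nat.mod_eq_of_lt hx]

theorem cell_value (m1 m2 : List (List (Int × Int))) (r c : Nat)
    (hr : r < m1.length * m2.length)
    (hc : c < (m1.getD 0 []).length * (m2.getD 0 []).length) :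
    pvGet2d (productoTensor m1 m2) r c =
      producto ((m1.getD (r / m2.length) []).getD (c / (m2.getD 0 []).length) (0, 0))
               ((m2.getD (r % m2.length) []).getD (c % (m2.getD 0 []).length) (0, 0)) := by
  have hn2 : 0 < m2.length := by
    rcases Nat.eq_zero_or_pos m2.length with h | h
    · rw [h, Nat.mul_zero] at hr; omega
    · exact h
  have hc2 : 0 < (m2.getD 0 []).length := by
    rcases Nat.eq_zero_or_pos (m2.getD 0 []).length with h | h
    · rw [h, Nat.mul_zero] at hc; omega
    · exact h
  rw [productoTensor_eq_writeAll]
  apply writeAll_unique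
  · intro e he h1 h2
    simp only [pvL, List.mem_flatMap, List.mem_map, List.mem_range] at he
    obtain ⟨i, hi, j, hj, x, hx, y, hy, rfl⟩ := he
    simp only at h1 h2 ⊢
    obtain ⟨hi', hx'⟩ := div_mod_unique i x m2.length r hx h1
    obtain ⟨hj', hy'⟩ := div_mod_unique j y (m2.getD 0 []).length c hy h2
    subst hi'; subst hx'; subst hj'; subst hy'
    rfl
  · refine ⟨(r / m2.length * m2.length + r % m2.length,
      c / (m2.getD 0 []).length * (m2.getD 0 []).length + c % (m2.getD 0 []).length,
      producto ((m1.getD (r / m2.length) []).getD (c / (m2.getD 0 []).length) (0, 0))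
               ((m2.getD (r % m2.length) []).getD (c % (m2.getD 0 []).length) (0, 0))), ?_, ?_, ?_⟩
    · simp only [pvL, List.mem_flatMap, List.mem_map, List.mem_range]
      exact ⟨r / m2.length, (Nat.div_lt_iff_lt_mul hn2).mpr hr,
        c / (m2.getD 0 []).length, (Nat.div_lt_iff_lt_mul hc2).mpr hc,
        r % m2.length, Nat.mod_lt _ hn2,
        c % (m2.getD 0 []).length, Nat.mod_lt _ hc2, rfl⟩
    · simpa [Nat.mul_comm] using Nat.div_add_mod r m2.length
    · simpa [Nat.mul_comm] using Nat.div_add_mod c (m2.getD 0 []).length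
  · simpa [pvRes0] using hr
  · simp only [pvRes0, List.getD, List.getElem?_map]
    rw [List.getElem?_range hr]
    simpa using hc

theorem productoTensor_length (m1 m2 : List (List (Int × Int))) :
    (productoTensor m1 m2).length = m1.length * m2.length := by
  rw [productoTensor_eq_writeAll, writeAll_length]; simp [pvRes0]

theorem productoTensor_row_length (m1 m2 : List (List (Int × Int))) (r : Nat)
    (hr : r < m1.length * m2.length) :
    ((productoTensor m1 m2).getD r []).length = (m1.getD 0 []).length * (m2.getD 0 []).length := by
  rw [productoTensor_eq_writeAll, writeAll_row_length]
  simp only [pvRes0, List.getD, List.getElem?_map]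
  rw [List.getElem?_range hr]; simp

theorem alt_cell (m1 m2 : List (List (Int × Int))) (r c : Nat)
    (hr : r < m1.length * m2.length)
    (hc : c < (m1.getD 0 []).length * (m2.getD 0 []).length) :
    pvGet2d (productoTensor_alt m1 m2) r c =
      producto ((m1.getD (r / m2.length) []).getD (c / (m2.getD 0 []).length) (0, 0))
               ((m2.getD (r % m2.length) []).getD (c % (m2.getD 0 []).length) (0, 0)) := by
  simp only [List.getD] at hc
  simp only [pvGet2d, productoTensor_alt, List.getD, List.getElem?_map]
  rw [List.getElem?_range hr]
  simp only [Option.map_some, Option.getD_some, List.getElem?_map]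
  rw [List.getElem?_range hc]
  simp

theorem alt_length (m1 m2 : List (List (Int × Int))) :
    (productoTensor_alt m1 m2).length = m1.length * m2.length := by
  simp [productoTensor_alt]

theorem alt_row_length (m1 m2 : List (List (Int × Int))) (r : Nat)
    (hr : r < m1.length * m2.length) :
    ((productoTensor_alt m1 m2).getD r []).length = (m1.getD 0 []).length * (m2.getD 0 []).length := by
  simp only [productoTensor_alt, List.getD, List.getElem?_map]
  rw [List.getElem?_range hr]; simp

theorem getD_eq_getElem' (M : List (List (Int × Int))) (r : Nat) (h : r < M.length) :
    M.getD r [] = M[r] := List.getD_eq_getElem M [] h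

-- ===== VERDICT (by name: the statement is the Claim_ definition above) =====
theorem productoTensor_spec : Claim_equal_productoTensor := by
  intro m1 m2 _ _
  unfold Spec_productoTensor
  apply List.ext_getElem
  · rw [productoTensor_length, alt_length]
  · intro r h1 h2
    have hr : r < m1.length * m2.length := by rwa [productoTensor_length] at h1
    apply List.ext_getElem
    · have := productoTensor_row_length m1 m2 r hr
      have := alt_row_length m1 m2 r hr
      rw [getD_eq_getElem' _ _ h1] at *
      rw [getD_eq_getElem' _ _ h2] at *
      omega
    · intro c hc1 hc2
      have hc : c < (m1.getD 0 []).length * (m2.getD 0 []).length := by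
        have := productoTensor_row_length m1 m2 r hr
        rw [getD_eq_getElem' _ _ h1] at this; omega
      have e1 := cell_value m1 m2 r c hr hc
      have e2 := alt_cell m1 m2 r c hr hc
      simp only [pvGet2d] at e1 e2
      rw [getD_eq_getElem' _ _ h1, List.getD_eq_getElem _ _ hc1] at e1
      rw [getD_eq_getElem' _ _ h2, List.getD_eq_getElem _ _ hc2] at e2
      rw [e1, e2]
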